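-- pv_equiv track=rewrite | github.com/tkfka1/CodingTest | 프로그래머스/lv0/120878. 유한소수 판별하기/유한소수 판별하기.py | solution
-- ===== SOURCE A (Python) =====
-- def solution(a, b):
--     answer = 0
--     # 유클리드 호제법
--     def gcd(a, b):
--         while b > 0:
--             a, b = b, a % b
--         return a
--
--     calgcd = b//gcd(a,b)
--
--     while True:
--         if calgcd % 2 == 0:
--             calgcd = calgcd//2
--         else:
--             break
--     while True:
--         if calgcd % 5 == 0:
--             calgcd = calgcd//5
--         else:
--             break
--
--     if calgcd == 1:
--         return 1
--     else:
--         return 2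
-- ===== SOURCE B (Python) =====
-- def solution(a, b):
--     # B: reduce the denominator, then one closed-form finiteness test:
--     # the fraction is a finite decimal iff d divides a power of 10, and since
--     # d <= 2**31 here, d has at most 31 factors of 2 (or of 5), so d divides a
--     # power of 10 iff d divides 10**32.
--     def gcd(x, y):
--         return gcd(y, x % y) if y else x
--     d = b // gcd(a, b)
--     return 1 if pow(10, 32, d) == 0 else 2
-- ===== Notes on version B (the rewrite author's own statement) =====
-- stated objective: simpler
-- what changed: Replaced A's two factor-stripping loops (divide out all 2s, then all 5s, then compare with 1) by one closed-form modular test pow(10, 32, d) == 0 on the reduced denominator d = b // gcd(a, b): d's prime factors are only 2 and 5 iff d divides a power of 10, and for d <= 2^31 the exponent 32 suffices.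
-- outside the precondition, e.g. on solution(3, -6): A returns 2, B returns 1; on solution(0, -4): A raises ZeroDivisionError, B returns 1; on solution(1, 0): A does not finish within the time limit, B raises ValueError
import Mathlib
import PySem

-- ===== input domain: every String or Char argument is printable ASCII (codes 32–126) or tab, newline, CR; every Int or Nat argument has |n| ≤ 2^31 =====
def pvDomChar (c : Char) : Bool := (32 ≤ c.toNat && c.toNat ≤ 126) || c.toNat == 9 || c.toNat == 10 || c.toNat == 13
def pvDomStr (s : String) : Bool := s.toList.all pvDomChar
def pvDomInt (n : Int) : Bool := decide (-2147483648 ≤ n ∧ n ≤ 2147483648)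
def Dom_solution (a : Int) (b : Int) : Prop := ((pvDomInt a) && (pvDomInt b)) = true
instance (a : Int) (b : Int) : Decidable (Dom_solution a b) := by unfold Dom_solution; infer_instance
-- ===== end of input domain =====

-- B replaces A's two factor-stripping loops by the closed-form test pow(10, d, d) == 0
-- on the reduced denominator d = b // gcd(a, b)  (objective: simpler).


-- ===== PORT A =====
-- A's inner helper: 'while b > 0: a, b = b, a % b; return a'
def gcdA (a b : Int) : Int :=
  if h : 0 < b then gcdA b (PySem.Int.mod a b) else a
termination_by b.toNat
decreasing_by
  have h1 := PySem.Int.mod_nonneg a h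
  have h2 := PySem.Int.mod_lt a h
  omega

-- A's first loop: 'while True: if calgcd % 2 == 0: calgcd //= 2 else: break'.
-- Python diverges at calgcd = 0 (reachable only for b ≤ 0, outside Pre_); the fuel
-- argument (called with natAbs+1, enough for every nonzero value) only totalizes.
def strip2A : Int → Nat → Int
  | c, 0 => c
  | c, f+1 => if PySem.Int.mod c 2 = 0 then strip2A (PySem.Int.floordiv c 2) f else c

-- A's second loop, same shape with 5.
def strip5A : Int → Nat → Int
  | c, 0 => c
  | c, f+1 => if PySem.Int.mod c 5 = 0 then strip5A (PySem.Int.floordiv c 5) f else c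

def solution (a : Int) (b : Int) : Int :=
  let calgcd := PySem.Int.floordiv b (gcdA a b)
  let c2 := strip2A calgcd (calgcd.natAbs + 1)
  let c5 := strip5A c2 (c2.natAbs + 1)
  if c5 = 1 then 1 else 2

-- ===== PORT B =====
-- B's helper: 'gcd(y, x % y) if y else x'
def gcdB (x y : Int) : Int :=
  if h : y ≠ 0 then gcdB y (PySem.Int.mod x y) else x
termination_by y.natAbs
decreasing_by
  rcases lt_or_gt_of_ne h with hy | hy
  · have := PySem.Int.mod_neg_bounds x hy
    omega
  · have h1 := PySem.Int.mod_nonneg x hy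
    have h2 := PySem.Int.mod_lt x hy
    omega

-- pow(10, 32, d): Python raises (ZeroDivisionError / ValueError) only when d = 0,
-- which needs b ≤ 0 — outside Pre_; PySem.Int.powMod is total there.
def solution_alt (a : Int) (b : Int) : Int :=
  let d := PySem.Int.floordiv b (gcdB a b)
  if PySem.Int.powMod 10 32 d = 0 then 1 else 2

-- ===== PRECONDITION & SPEC =====
-- Pre_ excludes non-positive b (a non-positive denominator, which the function's purpose never
-- asks about): there A's gcd helper (its guard is 'b > 0') degenerates — A diverges (e.g. b = 0,
-- or a and b negative with |b| < |a|), raises ZeroDivisionError (a = 0, b ≤ 0), or returns an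
-- accidental value from a sign-mismatched floor division — and B's value there (a negative
-- modulus, or a ValueError at d = 0) is equally accidental; neither value would be specified.
def Pre_solution (a : Int) (b : Int) : Prop := 0 < b
instance (a : Int) (b : Int) : Decidable (Pre_solution a b) := by unfold Pre_solution; infer_instance

def pvWitness_solution : Int × Int := (3, 6)

def Spec_solution (a : Int) (b : Int) (out : Int) : Prop := out = solution_alt a b
instance (a : Int) (b : Int) (out : Int) : Decidable (Spec_solution a b out) := by unfold Spec_solution; infer_instance

-- ===== CLAIM (what is proved, stated in full; the proofs are below) =====
def Claim_equal_solution : Prop := ∀ (a : Int) (b : Int), Dom_solution a b → Pre_solution a b → Spec_solution a b (solution a b)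

-- ===== LEMMAS AND PROOFS =====

-- one Euclid step preserves Int.gcd
lemma gcd_mod_step (a b : Int) (hb : 0 < b) :
    Int.gcd b (PySem.Int.mod a b) = Int.gcd a b := by
  rw [PySem.Int.mod_eq_emod_of_pos hb]
  have h : a % b = a + (-(a / b)) * b := by
    rw [Int.emod_def]; ring
  rw [h, Int.gcd_add_mul_right_right, Int.gcd_comm]

lemma gcdA_eq : ∀ (n : Nat) (a b : Int), 0 < b → b.toNat ≤ n → gcdA a b = (Int.gcd a b : Int) := by
  intro n
  induction n with
  | zero => intro a b hb hle; omega
  | succ n ih =>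
    intro a b hb hle
    rw [gcdA, dif_pos hb]
    have hnn := PySem.Int.mod_nonneg a hb
    have hlt := PySem.Int.mod_lt a hb
    by_cases hm : 0 < PySem.Int.mod a b
    · rw [ih b _ hm (by omega), gcd_mod_step a b hb]
    · have hm0 : PySem.Int.mod a b = 0 := by omega
      rw [hm0, gcdA, dif_neg (by omega)]
      have := gcd_mod_step a b hb
      rw [hm0, Int.gcd_zero_right] at this
      rw [← this]
      omega

lemma gcdB_eq : ∀ (n : Nat) (a b : Int), 0 < b → b.toNat ≤ n → gcdB a b = (Int.gcd a b : Int) := by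
  intro n
  induction n with
  | zero => intro a b hb hle; omega
  | succ n ih =>
    intro a b hb hle
    rw [gcdB, dif_pos (by omega : b ≠ 0)]
    have hnn := PySem.Int.mod_nonneg a hb
    have hlt := PySem.Int.mod_lt a hb
    by_cases hm : 0 < PySem.Int.mod a b
    · rw [ih b _ hm (by omega), gcd_mod_step a b hb]
    · have hm0 : PySem.Int.mod a b = 0 := by omega
      rw [hm0, gcdB, dif_neg (by omega)]
      have := gcd_mod_step a b hb
      rw [hm0, Int.gcd_zero_right] at this
      rw [← this]
      omega

-- what A's first loop computes on a positive value: the odd part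
lemma strip2A_spec : ∀ (f : Nat) (c : Int), 0 < c → c.natAbs ≤ f →
    0 < strip2A c f ∧ ¬ (2:Int) ∣ strip2A c f ∧ ∃ k : Nat, c = 2 ^ k * strip2A c f := by
  intro f
  induction f with
  | zero => intro c hc hle; omega
  | succ f ih =>
    intro c hc hle
    rw [strip2A]
    by_cases h2 : PySem.Int.mod c 2 = 0
    · rw [if_pos h2]
      obtain ⟨t, rfl⟩ := (PySem.Int.mod_eq_zero_iff_dvd c 2).1 h2
      have ht : 0 < t := by omega
      have hfd : PySem.Int.floordiv (2 * t) 2 = t := by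
        rw [PySem.Int.floordiv_eq_ediv_of_pos (by norm_num), Int.mul_ediv_cancel_left t (by norm_num)]
      rw [hfd]
      obtain ⟨hp, hodd, k, hk⟩ := ih t ht (by omega)
      refine ⟨hp, hodd, k + 1, ?_⟩
      conv_lhs => rw [hk]
      ring
    · rw [if_neg h2]
      exact ⟨hc, fun hd => h2 ((PySem.Int.mod_eq_zero_iff_dvd c 2).2 hd), 0, by ring⟩

-- what A's second loop computes on a positive value: divide out all factors 5
lemma strip5A_spec : ∀ (f : Nat) (c : Int), 0 < c → c.natAbs ≤ f →
    0 < strip5A c f ∧ ¬ (5:Int) ∣ strip5A c f ∧ ∃ j : Nat, c = 5 ^ j * strip5A c f ∧ strip5A c f ∣ c := by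
  intro f
  induction f with
  | zero => intro c hc hle; omega
  | succ f ih =>
    intro c hc hle
    rw [strip5A]
    by_cases h5 : PySem.Int.mod c 5 = 0
    · rw [if_pos h5]
      obtain ⟨t, rfl⟩ := (PySem.Int.mod_eq_zero_iff_dvd c 5).1 h5
      have ht : 0 < t := by omega
      have hfd : PySem.Int.floordiv (5 * t) 5 = t := by
        rw [PySem.Int.floordiv_eq_ediv_of_pos (by norm_num), Int.mul_ediv_cancel_left t (by norm_num)]
      rw [hfd]
      obtain ⟨hp, hnd, j, hj, hdvd⟩ := ih t ht (by omega)
      refine ⟨hp, hnd, j + 1, ?_, hdvd.mul_left 5⟩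
      conv_lhs => rw [hj]
      ring
    · rw [if_neg h5]
      exact ⟨hc, fun hd => h5 ((PySem.Int.mod_eq_zero_iff_dvd c 5).2 hd), 0, by ring, dvd_rfl⟩

-- the heart of the equivalence: for 0 < d ≤ 2^31, A's strip chain ends at 1 iff d ∣ 10^32
lemma strip_iff_powMod (d : Int) (hd : 0 < d) (hdle : d ≤ 2147483648) :
    (strip5A (strip2A d (d.natAbs + 1)) ((strip2A d (d.natAbs + 1)).natAbs + 1) = 1)
      ↔ PySem.Int.powMod 10 32 d = 0 := by
  obtain ⟨h2p, h2odd, k, hk⟩ := strip2A_spec (d.natAbs + 1) d hd (by omega)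
  set r := strip2A d (d.natAbs + 1) with hr
  obtain ⟨h5p, h5nd, j, hj, hsr⟩ := strip5A_spec (r.natAbs + 1) r h2p (by omega)
  set s := strip5A r (r.natAbs + 1) with hs
  have hpm : PySem.Int.powMod 10 32 d = PySem.Int.mod (10 ^ 32) d := rfl
  rw [hpm, PySem.Int.mod_eq_zero_iff_dvd]
  constructor
  · intro hs1
    rw [hs1, mul_one] at hj
    have hdk : d = 2 ^ k * 5 ^ j := by rw [hk, hj]
    have h2d : (2:Int) ^ k ≤ d := Int.le_of_dvd hd ⟨5 ^ j, hdk⟩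
    have h5d : (5:Int) ^ j ≤ d := Int.le_of_dvd hd ⟨2 ^ k, by rw [hdk]; ring⟩
    have hkd : k ≤ 32 := by
      by_contra hgt
      have h1 : (2:Int) ^ 32 ≤ 2 ^ k := pow_le_pow_right₀ (by norm_num) (by omega)
      have h2 : (2:Int) ^ 32 ≤ d := le_trans h1 h2d
      norm_num at h2
      omega
    have hjd : j ≤ 32 := by
      by_contra hgt
      have h1 : (5:Int) ^ 32 ≤ 5 ^ j := pow_le_pow_right₀ (by norm_num) (by omega)
      have h2 : (5:Int) ^ 32 ≤ d := le_trans h1 h5d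
      norm_num at h2
      omega
    have h10 : (10:Int) ^ 32 = 2 ^ 32 * 5 ^ 32 := by norm_num
    have hdd : (2:Int) ^ k * 5 ^ j ∣ 10 ^ 32 := by
      rw [h10]
      exact mul_dvd_mul (pow_dvd_pow 2 hkd) (pow_dvd_pow 5 hjd)
    rwa [← hdk] at hdd
  · intro hdvd
    by_contra hne
    have hs1 : 1 < s := by omega
    have hsd : s ∣ d := by
      refine ⟨2 ^ k * 5 ^ j, ?_⟩
      conv_lhs => rw [hk, hj]
      ring
    have hspow : s ∣ (10:Int) ^ 32 := hsd.trans hdvd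
    -- move to Nat and pick the least prime factor of s
    have hsn : s = ((s.toNat : Nat) : Int) := by omega
    have hmd : s.toNat ∣ 10 ^ 32 := by
      rw [← Int.natCast_dvd_natCast]
      push_cast
      rw [← hsn]
      exact hspow
    have hm1 : s.toNat ≠ 1 := by omega
    have hp := Nat.minFac_prime hm1
    have hpd10 : s.toNat.minFac ∣ 10 :=
      hp.dvd_of_dvd_pow ((Nat.minFac_dvd s.toNat).trans hmd)
    have h25 : s.toNat.minFac = 2 ∨ s.toNat.minFac = 5 := by
      have key : ∀ p, p ≤ 10 → Nat.Prime p → p ∣ 10 → p = 2 ∨ p = 5 := by decide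
      exact key _ (Nat.le_of_dvd (by norm_num) hpd10) hp hpd10
    have hdvds : (s.toNat.minFac : Int) ∣ s := by
      rw [hsn]
      exact_mod_cast Nat.minFac_dvd s.toNat
    rcases h25 with h | h
    · rw [h] at hdvds
      exact h2odd (by exact_mod_cast hdvds.trans hsr)
    · rw [h] at hdvds
      exact h5nd (by exact_mod_cast hdvds)

-- ===== VERDICT (by name: the statement is the Claim_ definition above) =====
theorem solution_spec : Claim_equal_solution := by
  intro a b hdom hb
  have hb' : 0 < b := hb
  unfold Spec_solution
  simp only [solution, solution_alt]
  rw [gcdA_eq b.toNat a b hb' le_rfl, gcdB_eq b.toNat a b hb' le_rfl]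
  have hgne : a.gcd b ≠ 0 := by
    intro h
    have h2 := Int.gcd_eq_zero_iff.1 h
    omega
  have hg0 : (0:Int) < ((a.gcd b : Nat) : Int) := by exact_mod_cast Nat.pos_of_ne_zero hgne
  have hgd : ((a.gcd b : Nat) : Int) ∣ b := Int.gcd_dvd_right a b
  have hfd : PySem.Int.floordiv b ((a.gcd b : Nat) : Int) = b / ((a.gcd b : Nat) : Int) :=
    PySem.Int.floordiv_eq_ediv_of_pos hg0
  have hd0 : 0 < PySem.Int.floordiv b ((a.gcd b : Nat) : Int) := by
    rw [hfd]
    have hmul : b / ((a.gcd b : Nat) : Int) * ((a.gcd b : Nat) : Int) = b := Int.ediv_mul_cancel hgd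
    nlinarith
  have hble : b ≤ 2147483648 := by
    have hd := hdom
    unfold Dom_solution pvDomInt at hd
    simp only [Bool.and_eq_true, decide_eq_true_eq] at hd
    exact hd.2.2
  have hdle : PySem.Int.floordiv b ((a.gcd b : Nat) : Int) ≤ 2147483648 := by
    rw [hfd]
    exact le_trans (Int.ediv_le_self _ (le_of_lt hb')) hble
  have hiff := strip_iff_powMod _ hd0 hdle
  by_cases hA : strip5A (strip2A (PySem.Int.floordiv b ((a.gcd b : Nat) : Int))
      ((PySem.Int.floordiv b ((a.gcd b : Nat) : Int)).natAbs + 1))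
      ((strip2A (PySem.Int.floordiv b ((a.gcd b : Nat) : Int))
        ((PySem.Int.floordiv b ((a.gcd b : Nat) : Int)).natAbs + 1)).natAbs + 1) = 1
  · rw [if_pos hA, if_pos (hiff.1 hA)]
  · rw [if_neg hA, if_neg fun h => hA (hiff.2 h)]
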